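-- pv_equiv track=rewrite | github.com/JohnDoe-collab-stack/forU2read | Empirical/aslmt/v19_algebra_universal_v1/audit_v19_algebra_universal_algebra.py | _pair_index
-- ===== SOURCE A (Python) =====
-- def _pair_index(n: int) -> dict[tuple[int, int], int]:
--     out: dict[tuple[int, int], int] = {}
--     k = 0
--     for u in range(int(n)):
--         for v in range(u + 1, int(n)):
--             out[(u, v)] = k
--             k += 1
--     return out
-- ===== SOURCE B (Python) =====
-- def _pair_index(n: int) -> dict[tuple[int, int], int]:
--     N = int(n)
--     return {(u, v): u * (2 * N - u - 1) // 2 + (v - u - 1)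
--             for u in range(N) for v in range(u + 1, N)}
-- ===== Notes on version B (the rewrite author's own statement) =====
-- stated objective: simpler
-- what changed: Replaces the mutable dict plus running counter k with a single dict comprehension whose value is computed per pair by the closed-form triangular formula u*(2N-u-1)//2 + (v-u-1), so no accumulator state is maintained.
import Mathlib
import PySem

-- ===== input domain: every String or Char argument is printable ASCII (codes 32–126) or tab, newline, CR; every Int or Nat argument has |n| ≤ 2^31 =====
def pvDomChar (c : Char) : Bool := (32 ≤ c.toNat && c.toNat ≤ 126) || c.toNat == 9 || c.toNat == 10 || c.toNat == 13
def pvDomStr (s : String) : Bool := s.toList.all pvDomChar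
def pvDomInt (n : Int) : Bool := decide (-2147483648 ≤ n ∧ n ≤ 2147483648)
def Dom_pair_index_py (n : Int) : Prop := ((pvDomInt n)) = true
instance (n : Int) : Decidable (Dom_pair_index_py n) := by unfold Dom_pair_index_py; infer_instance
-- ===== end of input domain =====

-- B replaces A's mutable dict with a running counter k by a stateless dict comprehension
-- whose value per pair (u,v) is the closed-form triangular index u*(2n-u-1)//2 + (v-u-1) (objective: simpler).

-- ===== PORT A =====
-- dict entries ((u,v),k) are returned flattened as triples (u, v, k) per the type convention
def pair_index_py (n : Int) : List (Int × Int × Int) :=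
  let st :=
    (PySem.List.pyRange 0 n).foldl
      (fun (st : PySem.Dict (Int × Int) Int × Int) u =>
        (PySem.List.pyRange (u + 1) n).foldl
          (fun st v => (st.1.insert (u, v) st.2, st.2 + 1)) st)
      ((PySem.Dict.empty : PySem.Dict (Int × Int) Int), 0)
  st.1.items.map (fun p => (p.1.1, p.1.2, p.2))

-- ===== PORT B =====
def pair_index_py_alt (n : Int) : List (Int × Int × Int) :=
  (PySem.List.pyRange 0 n).flatMap fun u =>
    (PySem.List.pyRange (u + 1) n).map fun v =>
      (u, v, PySem.Int.floordiv (u * (2 * n - u - 1)) 2 + (v - u - 1))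

-- ===== PRECONDITION & SPEC =====
def Spec_pair_index_py (n : Int) (out : List (Int × Int × Int)) : Prop := out = pair_index_py_alt n
instance (n : Int) (out : List (Int × Int × Int)) : Decidable (Spec_pair_index_py n out) := by unfold Spec_pair_index_py; infer_instance

-- ===== CLAIM (what is proved, stated in full; the proofs are below) =====
def Claim_equal_pair_index_py : Prop := ∀ (n : Int), Dom_pair_index_py n → Spec_pair_index_py n (pair_index_py n)

-- ===== LEMMAS AND PROOFS =====

-- A's inner loop over range(a, n): it appends one fresh entry per v with consecutive counter values.
lemma pv_inner (n u : Int) : ∀ (c : Nat) (a k : Int) (d : PySem.Dict (Int × Int) Int),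
    a + c = n →
    (∀ v ∈ PySem.List.pyRange a n, d.contains (u, v) = false) →
    ((PySem.List.pyRange a n).foldl
        (fun st v => (st.1.insert (u, v) st.2, st.2 + 1)) (d, k)).2 = k + c ∧
    ((PySem.List.pyRange a n).foldl
        (fun st v => (st.1.insert (u, v) st.2, st.2 + 1)) (d, k)).1.items
      = d.items ++ (PySem.List.pyRange a n).map (fun v => ((u, v), k + (v - a))) := by
  intro c
  induction c with
  | zero =>
    intro a k d hac _
    have h0 : PySem.List.pyRange a n = [] := by
      apply List.eq_nil_iff_forall_not_mem.mpr
      intro x hx; rw [PySem.List.mem_pyRange_one] at hx; omega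
    simp [h0]
  | succ c ih =>
    intro a k d hac hf
    have ha : a < n := by omega
    have hmema : a ∈ PySem.List.pyRange a n := by
      rw [PySem.List.mem_pyRange_one]; omega
    rw [PySem.List.pyRange_one_cons ha]
    simp only [List.foldl_cons]
    have hf1 : ∀ v ∈ PySem.List.pyRange (a + 1) n,
        (d.insert (u, a) k).contains (u, v) = false := by
      intro v hv
      rw [PySem.List.mem_pyRange_one] at hv
      rw [PySem.Dict.contains_insert]
      have hne : ((u, v) == (u, a)) = false := by
        simp only [beq_eq_false_iff_ne, ne_eq, Prod.mk.injEq, not_and]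
        intro _; omega
      rw [hne]
      simp only [Bool.false_or]
      apply hf
      rw [PySem.List.mem_pyRange_one]; omega
    obtain ⟨h2, h1⟩ := ih (a + 1) (k + 1) (d.insert (u, a) k) (by omega) hf1
    constructor
    · rw [h2]; push_cast; ring
    · rw [h1, PySem.Dict.items_insert_of_not_contains d k (hf a hmema)]
      have hfun : (fun v : Int => ((u, v), k + 1 + (v - (a + 1))))
          = fun v : Int => ((u, v), k + (v - a)) := by
        funext v
        have : k + 1 + (v - (a + 1)) = k + (v - a) := by ring
        rw [this]
      rw [hfun, List.map_cons, List.append_assoc]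
      have hka : k + (a - a) = k := by ring
      rw [hka]
      simp

-- the triangular counter advances by one row length
lemma pv_stepk (n m : Int) :
    PySem.Int.floordiv (m * (2 * n - m - 1)) 2 + (n - m - 1)
      = PySem.Int.floordiv ((m + 1) * (2 * n - (m + 1) - 1)) 2 := by
  have he1 : Even (m * (2 * n - m - 1)) := by
    have h1 : m * (2 * n - m - 1) = 2 * (m * n) - m * (m + 1) := by ring
    rw [h1]
    exact (even_two_mul (m * n)).sub (Int.even_mul_succ_self m)
  have he2 : Even ((m + 1) * (2 * n - (m + 1) - 1)) := by
    have h1 : (m + 1) * (2 * n - (m + 1) - 1) = 2 * ((m + 1) * n) - (m + 1) * (m + 1 + 1) := by ring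
    rw [h1]
    exact (even_two_mul ((m + 1) * n)).sub (Int.even_mul_succ_self (m + 1))
  obtain ⟨A, hA⟩ := he1
  obtain ⟨B, hB⟩ := he2
  have key : 2 * B - 2 * A = 2 * n - 2 * m - 2 := by
    have hA' : m * (2 * n - m - 1) = 2 * A := by omega
    have hB' : (m + 1) * (2 * n - (m + 1) - 1) = 2 * B := by omega
    rw [← hA', ← hB']; ring
  rw [hA, hB,
    PySem.Int.floordiv_eq_ediv_of_pos (a := A + A) (by norm_num),
    PySem.Int.floordiv_eq_ediv_of_pos (a := B + B) (by norm_num)]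
  have e1 : A + A = 2 * A := by ring
  have e2 : B + B = 2 * B := by ring
  rw [e1, e2, Int.mul_ediv_cancel_left A (by norm_num), Int.mul_ediv_cancel_left B (by norm_num)]
  omega

-- A's outer loop over the first m rows: counter = closed form, all keys have first coord < m,
-- and the items are exactly B's comprehension restricted to u < m.
lemma pv_outer (n : Int) : ∀ (m : Nat), (m : Int) ≤ n →
    (((List.range m).map (fun i : Nat => (i : Int))).foldl
        (fun (st : PySem.Dict (Int × Int) Int × Int) u =>
          (PySem.List.pyRange (u + 1) n).foldl
            (fun st v => (st.1.insert (u, v) st.2, st.2 + 1)) st)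
        ((PySem.Dict.empty : PySem.Dict (Int × Int) Int), 0)).2
      = PySem.Int.floordiv ((m : Int) * (2 * n - m - 1)) 2 ∧
    (∀ p ∈ (((List.range m).map (fun i : Nat => (i : Int))).foldl
        (fun (st : PySem.Dict (Int × Int) Int × Int) u =>
          (PySem.List.pyRange (u + 1) n).foldl
            (fun st v => (st.1.insert (u, v) st.2, st.2 + 1)) st)
        ((PySem.Dict.empty : PySem.Dict (Int × Int) Int), 0)).1.items, p.1.1 < (m : Int)) ∧
    (((List.range m).map (fun i : Nat => (i : Int))).foldl
        (fun (st : PySem.Dict (Int × Int) Int × Int) u =>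
          (PySem.List.pyRange (u + 1) n).foldl
            (fun st v => (st.1.insert (u, v) st.2, st.2 + 1)) st)
        ((PySem.Dict.empty : PySem.Dict (Int × Int) Int), 0)).1.items
      = ((List.range m).map (fun i : Nat => (i : Int))).flatMap
          (fun u => (PySem.List.pyRange (u + 1) n).map
            (fun v => ((u, v), PySem.Int.floordiv (u * (2 * n - u - 1)) 2 + (v - u - 1)))) := by
  intro m
  induction m with
  | zero =>
    intro _
    refine ⟨?_, ?_, ?_⟩
    · rw [PySem.Int.floordiv_eq_ediv_of_pos (by norm_num)]
      simp
    · simp [PySem.Dict.empty]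
    · simp [PySem.Dict.empty]
  | succ m ih =>
    intro hmn
    have hm : (m : Int) ≤ n := by push_cast at hmn ⊢; omega
    obtain ⟨hk, hinv, hitems⟩ := ih hm
    rw [List.range_succ, List.map_append, List.foldl_append]
    simp only [List.map_cons, List.map_nil, List.foldl_cons, List.foldl_nil]
    set r := ((List.range m).map (fun i : Nat => (i : Int))).foldl
        (fun (st : PySem.Dict (Int × Int) Int × Int) u =>
          (PySem.List.pyRange (u + 1) n).foldl
            (fun st v => (st.1.insert (u, v) st.2, st.2 + 1)) st)
        ((PySem.Dict.empty : PySem.Dict (Int × Int) Int), 0) with hr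
    have hfresh : ∀ v ∈ PySem.List.pyRange ((m : Int) + 1) n, r.1.contains ((m : Int), v) = false := by
      intro v _
      rw [PySem.Dict.contains_eq_decide_mem_keys]
      simp only [PySem.Dict.keys, List.mem_map, decide_eq_false_iff_not]
      rintro ⟨p, hp, hpe⟩
      have h1 := hinv p hp
      rw [hpe] at h1
      simp at h1
    have hc : (m : Int) + (((n - ((m : Int) + 1)).toNat : Nat) : Int) + 1 = n := by
      push_cast at hmn
      omega
    have hst : (r.1, r.2) = r := rfl
    obtain ⟨h2, h1⟩ := pv_inner n (m : Int) ((n - ((m : Int) + 1)).toNat) ((m : Int) + 1) r.2 r.1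
        (by omega) hfresh
    rw [hst] at h2 h1
    refine ⟨?_, ?_, ?_⟩
    · rw [h2, hk]
      have hcc : (((n - ((m : Int) + 1)).toNat : Nat) : Int) = n - (m : Int) - 1 := by omega
      rw [hcc]
      have hs := pv_stepk n (m : Int)
      push_cast
      exact hs
    · intro p hp
      rw [h1] at hp
      rcases List.mem_append.mp hp with hp1 | hp2
      · have := hinv p hp1; push_cast; omega
      · obtain ⟨v, _, hv⟩ := List.mem_map.mp hp2
        rw [← hv]; push_cast; omega
    · rw [h1, hitems, List.flatMap_append]
      congr 1
      simp only [List.flatMap_cons, List.flatMap_nil, List.append_nil]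
      have hfun : (fun v : Int => (((m : Int), v), r.2 + (v - ((m : Int) + 1))))
          = fun v : Int => (((m : Int), v),
              PySem.Int.floordiv ((m : Int) * (2 * n - (m : Int) - 1)) 2 + (v - (m : Int) - 1)) := by
        funext v
        have : r.2 + (v - ((m : Int) + 1))
            = PySem.Int.floordiv ((m : Int) * (2 * n - (m : Int) - 1)) 2 + (v - (m : Int) - 1) := by
          rw [hk]; ring
        rw [this]
      rw [hfun]

-- ===== VERDICT (by name: the statement is the Claim_ definition above) =====
theorem pair_index_py_spec : Claim_equal_pair_index_py := by
  intro n _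
  unfold Spec_pair_index_py pair_index_py pair_index_py_alt
  by_cases hn : n ≤ 0
  · have h0 : PySem.List.pyRange 0 n = [] := by
      apply List.eq_nil_iff_forall_not_mem.mpr
      intro x hx; rw [PySem.List.mem_pyRange_one] at hx; omega
    simp [h0, PySem.Dict.empty]
  · have hr : PySem.List.pyRange 0 n = (List.range n.toNat).map (fun i : Nat => (i : Int)) := by
      conv_lhs => rw [show n = ((n.toNat : Nat) : Int) by omega]
      exact PySem.List.pyRange_zero_natCast _
    rw [hr]
    obtain ⟨_, _, hitems⟩ := pv_outer n n.toNat (by omega)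
    simp only [hitems, List.map_flatMap, List.map_map]
    rfl
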